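-- pv_equiv track=rewrite | github.com/nilanjanajui/Operating-System | LAB/19.filealloc.py | simulate_indexed
-- ===== SOURCE A (Python) =====
-- from typing import List, Tuple, Optional, Set
--
-- def simulate_indexed(N: int, free_blocks: Set[int], files: List[Tuple[str, int]]) -> List[Tuple[str, str]]:
--     """Simulate indexed allocation strategy."""
--     results = []
--     # Use sorted list for deterministic smallest block selection
--     available_blocks = sorted(free_blocks)
--
--     for name, size in files:
--         # Indexed allocation needs: 1 index block + size data blocks
--         total_needed = size + 1
--
--         if len(available_blocks) >= total_needed:
--             # Allocate blocks: first block is index, next 'size' blocks are data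
--             index_block = available_blocks[0]
--             data_blocks = available_blocks[1:size+1]
--
--             # Create data blocks string
--             data_str = ",".join(str(b) for b in data_blocks)
--             results.append((name, f"INDEX {index_block} DATA {data_str}"))
--
--             # Remove allocated blocks
--             available_blocks = available_blocks[total_needed:]
--         else:
--             results.append((name, "FAIL"))
--
--     return results
-- ===== SOURCE B (Python) =====
-- def simulate_indexed(N, free_blocks, files):
--     """Indexed allocation in two staged passes: plan start offsets, then render from a
--     precomputed string table (each block stringified once, no list re-slicing of blocks)."""
--     blocks = sorted(free_blocks)
--     text = [str(b) for b in blocks]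
--     n = len(blocks)
--     # pass 1: plan - starting offset per file, or None on failure
--     starts = []
--     pos = 0
--     for _name, size in files:
--         if n - pos >= size + 1:
--             starts.append(pos)
--             pos += size + 1
--         else:
--             starts.append(None)
--     # pass 2: render
--     return [(name, "FAIL") if s is None
--             else (name, "INDEX {} DATA {}".format(text[s], ",".join(text[s + 1:s + size + 1])))
--             for (name, size), s in zip(files, starts)]
-- ===== Notes on version B (the rewrite author's own statement) =====
-- stated objective: faster
-- what changed: B works in two staged passes - a planning pass that computes each file's start offset into the one sorted block list, then a rendering pass over a precomputed string table - instead of A's interleaved loop that rebuilds the available list by slicing and re-stringifies blocks per allocation.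
import Mathlib
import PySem

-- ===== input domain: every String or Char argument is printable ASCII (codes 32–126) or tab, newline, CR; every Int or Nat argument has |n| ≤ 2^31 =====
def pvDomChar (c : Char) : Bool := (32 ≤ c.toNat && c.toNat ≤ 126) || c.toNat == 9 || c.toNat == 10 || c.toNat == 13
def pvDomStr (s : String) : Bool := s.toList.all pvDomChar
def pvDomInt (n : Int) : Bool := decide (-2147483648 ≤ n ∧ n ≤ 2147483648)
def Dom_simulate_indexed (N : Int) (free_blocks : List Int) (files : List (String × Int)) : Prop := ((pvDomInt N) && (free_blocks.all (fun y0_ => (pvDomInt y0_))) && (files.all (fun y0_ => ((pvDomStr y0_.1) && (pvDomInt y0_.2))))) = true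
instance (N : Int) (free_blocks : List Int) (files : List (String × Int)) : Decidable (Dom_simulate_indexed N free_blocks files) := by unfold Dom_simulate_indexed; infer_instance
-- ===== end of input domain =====

-- B replaces A's per-file list re-slicing by two staged passes (plan start offsets, then render from a once-built string table); objective: faster.


-- ===== PORT A =====
-- loop body of A: state = (results, available_blocks)
def pvStepA (st : List (String × String) × List Int) (nf : String × Int) :
    List (String × String) × List Int :=
  let results := st.1
  let available_blocks := st.2
  let total_needed := nf.2 + 1
  if (available_blocks.length : Int) ≥ total_needed then
    let index_block := PySem.List.pyGetD available_blocks 0 0   -- available_blocks[0]; in range whenever Pre_ holds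
    let data_blocks := PySem.List.slice available_blocks (some 1) (some (nf.2 + 1))
    let data_str := PySem.Str.join "," (data_blocks.map PySem.Int.toStr)
    (results ++ [(nf.1, "INDEX " ++ PySem.Int.toStr index_block ++ " DATA " ++ data_str)],
     PySem.List.slice available_blocks (some total_needed) none)
  else
    (results ++ [(nf.1, "FAIL")], available_blocks)

def simulate_indexed (N : Int) (free_blocks : List Int) (files : List (String × Int)) : List (String × String) :=
  (files.foldl pvStepA ([], PySem.List.sorted free_blocks (fun x => x) false)).1

-- ===== PORT B =====
-- pass 1 loop body of B: state = (starts, pos); n is the (fixed) number of blocks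
def pvPlanStep (n : Int) (st : List (Option Int) × Int) (f : String × Int) :
    List (Option Int) × Int :=
  if n - st.2 ≥ f.2 + 1 then (st.1 ++ [some st.2], st.2 + (f.2 + 1))
  else (st.1 ++ [none], st.2)

-- pass 2: render one file from the precomputed string table
def pvRenderOne (text : List String) (fs : (String × Int) × Option Int) : String × String :=
  match fs.2 with
  | none => (fs.1.1, "FAIL")
  | some s =>
      (fs.1.1, "INDEX " ++ PySem.List.pyGetD text s "" ++ " DATA " ++
        PySem.Str.join "," (PySem.List.slice text (some (s + 1)) (some (s + fs.1.2 + 1))))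

def simulate_indexed_alt (N : Int) (free_blocks : List Int) (files : List (String × Int)) : List (String × String) :=
  let blocks := PySem.List.sorted free_blocks (fun x => x) false
  let text := blocks.map PySem.Int.toStr
  let n := (blocks.length : Int)
  let starts := (files.foldl (pvPlanStep n) ([], 0)).1
  (files.zip starts).map (pvRenderOne text)

-- ===== PRECONDITION & SPEC =====
-- Pre_ excludes files with a negative requested size (outside the task's natural domain): there A's negative
-- slice bounds wrap around, yielding accidental allocations, and A can raise IndexError on an empty block list.
def Pre_simulate_indexed (N : Int) (free_blocks : List Int) (files : List (String × Int)) : Prop :=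
  ∀ p ∈ files, 0 ≤ p.2
instance (N : Int) (free_blocks : List Int) (files : List (String × Int)) : Decidable (Pre_simulate_indexed N free_blocks files) := by unfold Pre_simulate_indexed; infer_instance

def pvWitness_simulate_indexed : Int × List Int × (List (String × Int)) :=
  (10, [3, 1, 2, 7], [("a", 1), ("b", 5), ("c", 0)])

def Spec_simulate_indexed (N : Int) (free_blocks : List Int) (files : List (String × Int)) (out : List (String × String)) : Prop := out = simulate_indexed_alt N free_blocks files
instance (N : Int) (free_blocks : List Int) (files : List (String × Int)) (out : List (String × String)) : Decidable (Spec_simulate_indexed N free_blocks files out) := by unfold Spec_simulate_indexed; infer_instance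

-- ===== CLAIM (what is proved, stated in full; the proofs are below) =====
def Claim_equal_simulate_indexed : Prop := ∀ (N : Int) (free_blocks : List Int) (files : List (String × Int)), Dom_simulate_indexed N free_blocks files → Pre_simulate_indexed N free_blocks files → Spec_simulate_indexed N free_blocks files (simulate_indexed N free_blocks files)

-- ===== LEMMAS AND PROOFS =====

-- recursive form of B's planning pass
def pvPlanGo (n : Int) : Int → List (String × Int) → List (Option Int)
  | _, [] => []
  | pos, f :: rest =>
      if n - pos ≥ f.2 + 1 then some pos :: pvPlanGo n (pos + (f.2 + 1)) rest
      else none :: pvPlanGo n pos rest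

lemma plan_unfold (n : Int) (files : List (String × Int)) :
    ∀ (acc : List (Option Int)) (pos : Int),
      (files.foldl (pvPlanStep n) (acc, pos)).1 = acc ++ pvPlanGo n pos files := by
  induction files with
  | nil => intro acc pos; simp [pvPlanGo]
  | cons f rest ih =>
      intro acc pos
      simp only [List.foldl_cons, pvPlanStep, pvPlanGo]
      split_ifs with h
      · rw [ih]; simp
      · rw [ih]; simp

-- one A-step equals the rendering of one planned entry, preserving the drop-pos relation
lemma main_rel (blocks : List Int) (files : List (String × Int)) :
    ∀ (res : List (String × String)) (pos : Nat), pos ≤ blocks.length →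
    (∀ p ∈ files, 0 ≤ p.2) →
    (files.foldl pvStepA (res, blocks.drop pos)).1
      = res ++ (files.zip (pvPlanGo (blocks.length : Int) (pos : Int) files)).map
          (pvRenderOne (blocks.map PySem.Int.toStr)) := by
  induction files with
  | nil => intro res pos _ _; simp [pvPlanGo]
  | cons nf rest ih =>
    intro res pos hpos hsz
    have hs : 0 ≤ nf.2 := hsz nf (by simp)
    obtain ⟨name, size⟩ := nf
    simp only at hs
    obtain ⟨s, rfl⟩ : ∃ s : Nat, size = (s : Int) := ⟨size.toNat, (Int.toNat_of_nonneg hs).symm⟩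
    simp only [List.foldl_cons, pvPlanGo]
    by_cases h : ((blocks.length : Int) - (pos : Int) ≥ (s : Int) + 1)
    · have hA : ((blocks.drop pos).length : Int) ≥ (s : Int) + 1 := by
        simp [List.length_drop]; omega
      rw [if_pos h]
      -- compute the A step
      have hget : PySem.List.pyGetD (blocks.drop pos) 0 0 = blocks.getD pos 0 := by
        simp [PySem.List.pyGetD_zero, List.getD, List.getElem?_drop]
      have hsl1 : PySem.List.slice (blocks.drop pos) (some 1) (some ((s : Int) + 1))
          = (blocks.drop (pos + 1)).take s := by
        rw [PySem.List.slice_toNat _ (by omega) (by omega), List.drop_drop]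
        have h2 : (((s : Int) + 1)).toNat = s + 1 := by omega
        rw [show ((1 : Int)).toNat = 1 from rfl, h2]
        congr 1
      have hsl2 : PySem.List.slice (blocks.drop pos) (some ((s : Int) + 1)) none
          = blocks.drop (pos + (s + 1)) := by
        rw [PySem.List.slice_from _ (by omega), List.drop_drop]
        congr 1
      have hstep : pvStepA (res, blocks.drop pos) (name, (s : Int))
          = (res ++ [(name, "INDEX " ++ PySem.Int.toStr (blocks.getD pos 0) ++ " DATA " ++
               PySem.Str.join "," (((blocks.drop (pos + 1)).take s).map PySem.Int.toStr))],
             blocks.drop (pos + (s + 1))) := by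
        unfold pvStepA
        simp only [if_pos hA, hget, hsl1, hsl2]
      -- the rendered entry on the B side
      have hrender : pvRenderOne (blocks.map PySem.Int.toStr) ((name, (s : Int)), some (pos : Int))
          = (name, "INDEX " ++ PySem.Int.toStr (blocks.getD pos 0) ++ " DATA " ++
               PySem.Str.join "," (((blocks.drop (pos + 1)).take s).map PySem.Int.toStr)) := by
        unfold pvRenderOne
        simp only
        have htext : PySem.List.pyGetD (blocks.map PySem.Int.toStr) (pos : Int) ""
            = PySem.Int.toStr (blocks.getD pos 0) := by
          have hlt : pos < blocks.length := by omega
          rw [PySem.List.pyGetD_natCast]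
          simp [List.getD, List.getElem?_map, List.getElem?_eq_getElem hlt]
        have hslice : PySem.List.slice (blocks.map PySem.Int.toStr)
              (some ((pos : Int) + 1)) (some ((pos : Int) + (s : Int) + 1))
            = ((blocks.drop (pos + 1)).take s).map PySem.Int.toStr := by
          rw [PySem.List.slice_toNat _ (by omega) (by omega)]
          have h3 : (((pos : Int) + 1)).toNat = pos + 1 := by omega
          have h4 : (((pos : Int) + (s : Int) + 1)).toNat = pos + s + 1 := by omega
          rw [h3, h4, show pos + s + 1 - (pos + 1) = s from by omega]
          simp [List.map_take, List.map_drop]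
        rw [htext, hslice]
      rw [hstep]
      have hih := ih (res ++ [(name, "INDEX " ++ PySem.Int.toStr (blocks.getD pos 0) ++ " DATA " ++
               PySem.Str.join "," (((blocks.drop (pos + 1)).take s).map PySem.Int.toStr))])
          (pos + (s + 1)) (by omega) (fun p hp => hsz p (by simp [hp]))
      rw [hih]
      have hcast : (pos : Int) + ((s : Int) + 1) = ((pos + (s + 1) : Nat) : Int) := by push_cast; ring
      rw [hcast, List.zip_cons_cons, List.map_cons, hrender, List.append_assoc]
      rfl
    · have hA : ¬ (((blocks.drop pos).length : Int) ≥ (s : Int) + 1) := by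
        simp [List.length_drop]; omega
      rw [if_neg h]
      have hstep : pvStepA (res, blocks.drop pos) (name, (s : Int))
          = (res ++ [(name, "FAIL")], blocks.drop pos) := by
        unfold pvStepA; simp only [if_neg hA]
      rw [hstep]
      have hih := ih (res ++ [(name, "FAIL")]) pos hpos (fun p hp => hsz p (by simp [hp]))
      rw [hih, List.zip_cons_cons, List.map_cons, List.append_assoc]
      rfl

-- ===== VERDICT (by name: the statement is the Claim_ definition above) =====
theorem simulate_indexed_spec : Claim_equal_simulate_indexed := by
  intro N free_blocks files _ hpre
  unfold Spec_simulate_indexed simulate_indexed simulate_indexed_alt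
  have hplan := plan_unfold ((PySem.List.sorted free_blocks (fun x => x) false).length : Int) files [] 0
  have hmain := main_rel (PySem.List.sorted free_blocks (fun x => x) false) files [] 0 (by omega) hpre
  simp only [hplan, List.nil_append] at *
  simpa using hmain
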